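-- pv_equiv track=rewrite | github.com/BitSecret/EuclidMachine | src/em/solver/generaterelation.py | split_predicates
-- ===== SOURCE A (Python) =====
-- def split_predicates(t):
--     res = []
--     cur = []
--
--     for x in t:
--         if x in (':', '&'):
--             if cur:
--                 res.append(tuple(cur))
--                 cur = []
--         else:
--             cur.append(x)
--
--     if cur:
--         res.append(tuple(cur))
--
--     return res
-- ===== SOURCE B (Python) =====
-- def split_predicates(t):
--     res = []
--     i = 0
--     n = len(t)
--     while i < n:
--         if t[i] in (':', '&'):
--             i += 1
--         else:
--             j = i + 1
--             while j < n and t[j] not in (':', '&'):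
--                 j += 1
--             res.append(tuple(t[i:j]))
--             i = j
--     return res
-- ===== Notes on version B (the rewrite author's own statement) =====
-- stated objective: alternative
-- what changed: B scans by index and emits each maximal delimiter-free run as one slice t[i:j] (an inner span scan), instead of A's element-by-element buffer accumulator with a post-loop flush.
import Mathlib
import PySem

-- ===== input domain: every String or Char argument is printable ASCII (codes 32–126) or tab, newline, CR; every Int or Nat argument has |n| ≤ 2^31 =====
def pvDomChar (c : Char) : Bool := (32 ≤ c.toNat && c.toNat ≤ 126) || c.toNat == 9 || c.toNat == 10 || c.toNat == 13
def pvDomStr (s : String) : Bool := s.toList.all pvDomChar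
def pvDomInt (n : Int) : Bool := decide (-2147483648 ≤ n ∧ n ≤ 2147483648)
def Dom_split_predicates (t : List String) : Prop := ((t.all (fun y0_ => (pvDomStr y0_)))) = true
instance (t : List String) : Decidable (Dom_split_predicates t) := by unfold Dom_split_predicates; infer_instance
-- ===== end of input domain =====

-- B is an alternative linear pass: it emits each maximal delimiter-free run as one slice
-- (index/span scan) instead of A's element buffer with a post-loop flush; return values equal.

-- ===== PORT A =====
-- A's loop body: state is (res, cur)
def pvStepA (rc : List (List String) × List String) (x : String) :
    List (List String) × List String :=
  if x == ":" || x == "&" then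
    if rc.2 ≠ [] then (rc.1 ++ [rc.2], []) else rc
  else
    (rc.1, rc.2 ++ [x])

def split_predicates (t : List String) : List (List String) :=
  let rc := t.foldl pvStepA ([], [])
  if rc.2 ≠ [] then rc.1 ++ [rc.2] else rc.1

-- ===== PORT B =====
-- B's inner while loop: take the run up to (not including) the next delimiter, and the rest
def pvSpanRun : List String → List String × List String
  | [] => ([], [])
  | y :: ys =>
    if y == ":" || y == "&" then ([], y :: ys)
    else
      let p := pvSpanRun ys
      (y :: p.1, p.2)

theorem pvSpanRun_snd_len (l : List String) : (pvSpanRun l).2.length ≤ l.length := by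
  induction l with
  | nil => simp [pvSpanRun]
  | cons y ys ih =>
    simp only [pvSpanRun]
    split
    · simp
    · simpa using Nat.le_succ_of_le ih

def split_predicates_alt : List String → List (List String)
  | [] => []
  | x :: xs =>
    if x == ":" || x == "&" then split_predicates_alt xs
    else (x :: (pvSpanRun xs).1) :: split_predicates_alt (pvSpanRun xs).2
termination_by t => t.length
decreasing_by
  · simp
  · exact Nat.lt_succ_of_le (pvSpanRun_snd_len xs)

-- ===== PRECONDITION & SPEC =====
def Spec_split_predicates (t : List String) (out : List (List String)) : Prop := out = split_predicates_alt t
instance (t : List String) (out : List (List String)) : Decidable (Spec_split_predicates t out) := by unfold Spec_split_predicates; infer_instance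

-- ===== CLAIM (what is proved, stated in full; the proofs are below) =====
def Claim_equal_split_predicates : Prop := ∀ (t : List String), Dom_split_predicates t → Spec_split_predicates t (split_predicates t)

-- ===== LEMMAS AND PROOFS =====

-- A's loop, written as structural recursion on the remaining input with state cur
def pvAltFrom (cur : List String) : List String → List (List String)
  | [] => if cur = [] then [] else [cur]
  | x :: xs =>
    if x == ":" || x == "&" then
      if cur = [] then pvAltFrom [] xs else cur :: pvAltFrom [] xs
    else pvAltFrom (cur ++ [x]) xs

theorem pvFoldA (t : List String) : ∀ (res : List (List String)) (cur : List String),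
    (let rc := t.foldl pvStepA (res, cur);
     if rc.2 ≠ [] then rc.1 ++ [rc.2] else rc.1) = res ++ pvAltFrom cur t := by
  induction t with
  | nil =>
    intro res cur
    by_cases h : cur = [] <;> simp [pvAltFrom, h]
  | cons x xs ih =>
    intro res cur
    simp only [List.foldl_cons, pvStepA, pvAltFrom]
    by_cases hd : (x == ":" || x == "&") = true
    · by_cases hc : cur = []
      · simp [hd, hc, ih]
      · simp [hd, hc, ih]
    · simp [hd, ih]

theorem pvAltFrom_span (t : List String) : ∀ cur : List String,
    pvAltFrom cur t =
      if cur = [] then split_predicates_alt t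
      else (cur ++ (pvSpanRun t).1) :: split_predicates_alt (pvSpanRun t).2 := by
  induction t with
  | nil =>
    intro cur
    by_cases h : cur = [] <;> simp [pvAltFrom, pvSpanRun, split_predicates_alt, h]
  | cons x xs ih =>
    intro cur
    by_cases hd : (x == ":" || x == "&") = true
    · by_cases hc : cur = []
      · simp [pvAltFrom, hd, hc, ih, split_predicates_alt, pvSpanRun]
      · simp [pvAltFrom, hd, hc, ih, split_predicates_alt, pvSpanRun]
    · by_cases hc : cur = []
      · simp [pvAltFrom, hd, hc, ih, split_predicates_alt, pvSpanRun]
      · simp [pvAltFrom, hd, hc, ih, split_predicates_alt, pvSpanRun]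

-- ===== VERDICT (by name: the statement is the Claim_ definition above) =====
theorem split_predicates_spec : Claim_equal_split_predicates := by
  intro t _
  unfold Spec_split_predicates split_predicates
  have h := pvFoldA t [] []
  simpa [pvAltFrom_span] using h
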